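-- pv_equiv track=rewrite | github.com/evashort/split | mlcs.py | getChildTokensWithSameCycleCount
-- ===== SOURCE A (Python) =====
-- def getChildTokensWithSameCycleCount(firstStop, cycleRanges, sequence):
--     childTokens = None
--     for tokenList in getFrontierContents(firstStop, cycleRanges, sequence):
--         if childTokens is None:
--             childTokens = set(tokenList)
--         else:
--             childTokens.intersection_update(tokenList)
--
--         if not childTokens:
--             return childTokens
--
--     return childTokens
--
-- def getFrontierContents(firstStop, cycleRanges, text):
--     frontierStart = firstStop
--     for frontierStop, nextFrontierStart in cycleRanges:
--         if frontierStop < frontierStart: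
--             continue
--
--         yield text[frontierStart:frontierStop]
--         frontierStart = nextFrontierStart
--
--     yield text[frontierStart:]
-- ===== SOURCE B (Python) =====
-- def getChildTokensWithSameCycleCount(firstStop, cycleRanges, sequence):
--     counts = {}
--     n = 0
--     frontierStart = firstStop
--     for frontierStop, nextFrontierStart in cycleRanges:
--         if frontierStop < frontierStart:
--             continue
--         for token in set(sequence[frontierStart:frontierStop]):
--             counts[token] = counts.get(token, 0) + 1
--         n += 1
--         frontierStart = nextFrontierStart
--     for token in set(sequence[frontierStart:]):
--         counts[token] = counts.get(token, 0) + 1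
--     n += 1
--     return {token for token, c in counts.items() if c == n}
-- ===== Notes on version B (the rewrite author's own statement) =====
-- stated objective: alternative
-- what changed: Replaces the running set-intersection over frontier slices (with early exit) by a single counting pass: a dict tallies in how many slices each token occurs, and the result is the set of tokens whose count equals the number of slices.
import Mathlib
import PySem

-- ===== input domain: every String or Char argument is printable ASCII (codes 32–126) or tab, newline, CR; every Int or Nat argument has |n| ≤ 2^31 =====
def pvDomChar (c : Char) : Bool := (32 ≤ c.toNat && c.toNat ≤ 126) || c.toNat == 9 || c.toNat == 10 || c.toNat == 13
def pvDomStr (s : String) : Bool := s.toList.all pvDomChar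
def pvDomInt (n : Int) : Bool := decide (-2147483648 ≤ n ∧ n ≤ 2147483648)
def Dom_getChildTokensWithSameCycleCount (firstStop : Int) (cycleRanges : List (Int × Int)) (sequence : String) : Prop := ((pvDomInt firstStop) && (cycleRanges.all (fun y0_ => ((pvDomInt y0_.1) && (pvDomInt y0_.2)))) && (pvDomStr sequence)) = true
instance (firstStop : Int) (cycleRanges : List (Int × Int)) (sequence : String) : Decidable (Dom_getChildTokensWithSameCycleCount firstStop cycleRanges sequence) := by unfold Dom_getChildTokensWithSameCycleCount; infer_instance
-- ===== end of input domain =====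

-- ===== PORT A =====
-- B replaces A's running set-intersection by a one-pass per-slice tally then a count filter; same result.
-- Tokens (Python 1-char strings) are carried as Char and rendered as String in the final step of both ports.

-- generator getFrontierContents, materialised as the list of yielded slices (on sequence.toList)
def pvFrontierA : Int → List (Int × Int) → List Char → List (List Char)
  | fs, [], text => [PySem.List.slice text (some fs) none]
  | fs, (stop, next) :: rest, text =>
      if stop < fs then pvFrontierA fs rest text
      else PySem.List.slice text (some fs) (some stop) :: pvFrontierA next rest text

-- A's loop: running intersection with early return on empty
def pvLoopA : List (List Char) → Option (PySem.Set Char) → Option (PySem.Set Char)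
  | [], acc => acc
  | t :: rest, acc =>
      let cts : PySem.Set Char :=
        match acc with
        | none => PySem.Set.ofList t
        | some s => PySem.Set.inter s (PySem.Set.ofList t)
      if cts = [] then some cts else pvLoopA rest (some cts)

def getChildTokensWithSameCycleCount (firstStop : Int) (cycleRanges : List (Int × Int)) (sequence : String) : Option (List String) :=
  (pvLoopA (pvFrontierA firstStop cycleRanges sequence.toList) none).map
    (fun st => st.map (fun c => String.ofList [c]))

-- ===== PORT B =====
-- for token in set(text): counts[token] = counts.get(token, 0) + 1
def pvTally (d : PySem.Dict Char Int) (t : List Char) : PySem.Dict Char Int :=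
  (PySem.Set.ofList t).foldl (fun d c => d.insert c (d.getD c 0 + 1)) d

-- B's single loop over cycleRanges, carrying the counts dict and the slice counter n
def pvLoopB : Int → List (Int × Int) → List Char → PySem.Dict Char Int → Int → PySem.Dict Char Int × Int
  | fs, [], text, d, n => (pvTally d (PySem.List.slice text (some fs) none), n + 1)
  | fs, (stop, next) :: rest, text, d, n =>
      if stop < fs then pvLoopB fs rest text d n
      else pvLoopB next rest text (pvTally d (PySem.List.slice text (some fs) (some stop))) (n + 1)

-- {token for token, c in counts.items() if c == n}, rendered as strings
def pvCollect (dn : PySem.Dict Char Int × Int) : List String :=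
  (PySem.Set.ofList ((dn.1.items.filter (fun p => p.2 == dn.2)).map (·.1))).map
    (fun c => String.ofList [c])

def getChildTokensWithSameCycleCount_alt (firstStop : Int) (cycleRanges : List (Int × Int)) (sequence : String) : Option (List String) :=
  some (pvCollect (pvLoopB firstStop cycleRanges sequence.toList PySem.Dict.empty 0))

-- ===== PRECONDITION & SPEC =====
def Spec_getChildTokensWithSameCycleCount (firstStop : Int) (cycleRanges : List (Int × Int)) (sequence : String) (out : Option (List String)) : Prop := out = getChildTokensWithSameCycleCount_alt firstStop cycleRanges sequence
instance (firstStop : Int) (cycleRanges : List (Int × Int)) (sequence : String) (out : Option (List String)) : Decidable (Spec_getChildTokensWithSameCycleCount firstStop cycleRanges sequence out) := by unfold Spec_getChildTokensWithSameCycleCount; infer_instance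

-- ===== CLAIM (what is proved, stated in full; the proofs are below) =====
def Claim_equal_getChildTokensWithSameCycleCount : Prop := ∀ (firstStop : Int) (cycleRanges : List (Int × Int)) (sequence : String), Dom_getChildTokensWithSameCycleCount firstStop cycleRanges sequence → Spec_getChildTokensWithSameCycleCount firstStop cycleRanges sequence (getChildTokensWithSameCycleCount firstStop cycleRanges sequence)

-- ===== LEMMAS AND PROOFS =====

-- the frontier generator always yields at least one slice
theorem pvFrontierA_ne_nil (fs : Int) (rs : List (Int × Int)) (text : List Char) :
    pvFrontierA fs rs text ≠ [] := by
  induction rs generalizing fs with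
  | nil => simp [pvFrontierA]
  | cons p rest ih =>
      simp only [pvFrontierA]
      split
      · exact ih fs
      · simp

-- B's loop = tally every frontier slice, n = number of slices
theorem pvLoopB_eq (fs : Int) (rs : List (Int × Int)) (text : List Char)
    (d : PySem.Dict Char Int) (n : Int) :
    pvLoopB fs rs text d n =
      ((pvFrontierA fs rs text).foldl pvTally d, n + (pvFrontierA fs rs text).length) := by
  induction rs generalizing fs d n with
  | nil => simp [pvLoopB, pvFrontierA]
  | cons p rest ih =>
      simp only [pvLoopB, pvFrontierA]
      split
      · exact ih _ _ _
      · rw [ih]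
        simp only [List.foldl_cons, List.length_cons]
        congr 1
        push_cast
        ring

-- intersection starting from the empty set stays empty
theorem foldl_inter_nil (rest : List (List Char)) :
    rest.foldl (fun s t => PySem.Set.inter s (PySem.Set.ofList t)) [] = [] := by
  induction rest with
  | nil => rfl
  | cons t rs ih => simpa [PySem.Set.inter] using ih

-- A's running intersection = filter of the start set by membership in every later slice
theorem foldl_inter_eq_filter (rest : List (List Char)) (s : PySem.Set Char) :
    rest.foldl (fun s t => PySem.Set.inter s (PySem.Set.ofList t)) s =
      s.filter (fun c => decide (∀ t ∈ rest, c ∈ t)) := by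
  induction rest generalizing s with
  | nil => simp
  | cons t rs ih =>
      rw [List.foldl_cons, ih]
      show List.filter _ (List.filter (fun x => (PySem.Set.ofList t).contains x) s) = _
      rw [List.filter_filter]
      apply List.filter_congr
      intro c _
      by_cases hc : c ∈ t <;>
        simp [PySem.Set.contains_iff, PySem.Set.mem_ofList, hc]

-- A's loop with a running set never returns early with a different value
theorem pvLoopA_some (rest : List (List Char)) (s : PySem.Set Char) :
    pvLoopA rest (some s) =
      some (rest.foldl (fun s t => PySem.Set.inter s (PySem.Set.ofList t)) s) := by
  induction rest generalizing s with
  | nil => rfl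
  | cons t rs ih =>
      simp only [pvLoopA, List.foldl_cons]
      split
      · rename_i h
        rw [h, foldl_inter_nil]
      · exact ih _

theorem pvLoopA_cons (t : List Char) (rest : List (List Char)) :
    pvLoopA (t :: rest) none =
      some (rest.foldl (fun s t => PySem.Set.inter s (PySem.Set.ofList t)) (PySem.Set.ofList t)) := by
  simp only [pvLoopA]
  split
  · rename_i h
    rw [h, foldl_inter_nil]
  · exact pvLoopA_some _ _

-- count of c in a deduplicated list is a 0/1 indicator
theorem count_ofList_eq (t : List Char) (c : Char) :
    (PySem.Set.ofList t).count c = if c ∈ t then 1 else 0 := by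
  by_cases hc : c ∈ t
  · simp [hc]
  · simp [hc, List.count_eq_zero.mpr (fun hmem => hc ((PySem.Set.mem_ofList t c).mp hmem))]

-- value of the counts dict after tallying a list of slices
theorem getD_foldl_pvTally (F : List (List Char)) (d : PySem.Dict Char Int) (c : Char) :
    (F.foldl pvTally d).getD c 0 = d.getD c 0 + (F.countP (fun t => decide (c ∈ t)) : Int) := by
  induction F generalizing d with
  | nil => simp
  | cons t rs ih =>
      rw [List.foldl_cons, ih, List.countP_cons]
      show (pvTally d t).getD c 0 + _ = _
      rw [pvTally, PySem.Dict.getD_foldl_insert_add_one, count_ofList_eq]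
      by_cases hc : c ∈ t <;> simp [hc] <;> ring

-- keys of the counts dict after tallying a list of slices
theorem keys_foldl_pvTally (F : List (List Char)) (d : PySem.Dict Char Int) :
    (F.foldl pvTally d).keys =
      F.foldl (fun k t => PySem.Set.update k (PySem.Set.ofList t)) d.keys := by
  induction F generalizing d with
  | nil => rfl
  | cons t rs ih =>
      rw [List.foldl_cons, List.foldl_cons, ih, pvTally, PySem.Dict.keys_foldl_insert]

theorem nodup_keys_foldl_pvTally (F : List (List Char)) (d : PySem.Dict Char Int)
    (h : d.keys.Nodup) : (F.foldl pvTally d).keys.Nodup := by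
  induction F generalizing d with
  | nil => exact h
  | cons t rs ih =>
      rw [List.foldl_cons]
      exact ih _ (PySem.Dict.nodup_keys_foldl_insert _ _ _ h)

-- updating by later slices adds no element satisfying a predicate already confined to k
theorem filter_foldl_update (F : List (List Char)) (k : PySem.Set Char) (P : Char → Bool)
    (hnd : k.Nodup) (hP : ∀ c, P c = true → c ∈ k) :
    (F.foldl (fun k t => PySem.Set.update k (PySem.Set.ofList t)) k).filter P = k.filter P := by
  induction F generalizing k with
  | nil => rfl
  | cons t rs ih =>
      rw [List.foldl_cons]
      rw [ih _ (PySem.Set.nodup_update _ _ hnd)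
        (fun c hc => (PySem.Set.mem_update _ _ c).mpr (Or.inl (hP c hc)))]
      rw [PySem.Set.update_eq_append_filter _ _, List.filter_append]
      have : ((PySem.Set.ofList (PySem.Set.ofList t)).filter
          (fun y => !k.contains y)).filter P = [] := by
        rw [List.filter_eq_nil_iff]
        intro a ha
        have h1 := List.of_mem_filter ha
        intro hPa
        have := hP a hPa
        simp [this] at h1
      rw [this, List.append_nil]

-- ===== VERDICT (by name: the statement is the Claim_ definition above) =====
theorem getChildTokensWithSameCycleCount_spec : Claim_equal_getChildTokensWithSameCycleCount := by
  intro firstStop cycleRanges sequence _dom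
  unfold Spec_getChildTokensWithSameCycleCount
  unfold getChildTokensWithSameCycleCount getChildTokensWithSameCycleCount_alt
  rw [pvLoopB_eq]
  set F := pvFrontierA firstStop cycleRanges sequence.toList with hF
  obtain ⟨s0, rest, hcons⟩ : ∃ s0 rest, F = s0 :: rest := by
    cases hFc : F with
    | nil => exact absurd hFc (pvFrontierA_ne_nil _ _ _)
    | cons a b => exact ⟨a, b, rfl⟩
  rw [hcons, pvLoopA_cons, foldl_inter_eq_filter]
  -- B side: items → keys.filter
  set d := (s0 :: rest).foldl pvTally PySem.Dict.empty with hd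
  have hnd : d.keys.Nodup := nodup_keys_foldl_pvTally _ _ (by simp [PySem.Dict.empty])
  simp only [pvCollect]
  rw [PySem.Dict.items_eq_map_keys d hnd 0, List.filter_map, List.map_map]
  have hmap : ((fun p => p.1) ∘ fun k => (k, d.getD k 0) : Char → Char) = id := rfl
  rw [hmap, List.map_id]
  -- predicate: count equals number of slices ↔ present in every slice
  have hpred : ∀ c : Char,
      ((fun p : Char × Int => p.2 == (0 : Int) + ((s0 :: rest).length : Int)) ∘
        fun k => (k, d.getD k 0)) c = decide (∀ t ∈ s0 :: rest, c ∈ t) := by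
    intro c
    have h0 : (PySem.Dict.empty : PySem.Dict Char Int).getD c 0 = 0 := rfl
    have hval := getD_foldl_pvTally (s0 :: rest) PySem.Dict.empty c
    rw [h0, zero_add, ← hd] at hval
    show (d.getD c 0 == (0 : Int) + ((s0 :: rest).length : Int)) = _
    rw [hval]
    by_cases hall : ∀ t ∈ s0 :: rest, c ∈ t
    · have : (s0 :: rest).countP (fun t => decide (c ∈ t)) = (s0 :: rest).length :=
        List.countP_eq_length.mpr (fun t ht => decide_eq_true (hall t ht))
      rw [this, decide_eq_true hall]
      simp
    · have hlt : (s0 :: rest).countP (fun t => decide (c ∈ t)) < (s0 :: rest).length :=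
        lt_of_le_of_ne List.countP_le_length
          (fun h => hall (fun t ht => of_decide_eq_true (List.countP_eq_length.mp h t ht)))
      simp only [hall, decide_false]
      rw [beq_eq_false_iff_ne]
      intro hEq
      omega
  rw [show (fun p : Char × Int => p.2 == (0 : Int) + ((s0 :: rest).length : Int)) ∘
      (fun k : Char => (k, d.getD k 0)) = fun c => decide (∀ t ∈ s0 :: rest, c ∈ t) from
      funext hpred]
  -- keys = updates over slices, filter collapses to the first slice
  have hkeys : d.keys = (rest.foldl (fun k t => PySem.Set.update k (PySem.Set.ofList t))
      (PySem.Set.ofList s0)) := by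
    rw [hd, keys_foldl_pvTally]
    simp only [List.foldl_cons]
    congr 1
    rw [show (PySem.Dict.empty : PySem.Dict Char Int).keys = ([] : List Char) from rfl]
    rw [PySem.Set.update_nil_left, PySem.Set.ofList_ofList]
  rw [hkeys, filter_foldl_update _ _ _ (PySem.Set.nodup_ofList s0)
    (fun c hc => by
      have hc' : ∀ t ∈ s0 :: rest, c ∈ t := by simpa using hc
      exact (PySem.Set.mem_ofList s0 c).mpr (hc' s0 (by simp)))]
  -- finally: drop the redundant membership in s0 and the identity Set.ofList
  have hfilters : (PySem.Set.ofList s0).filter (fun c => decide (∀ t ∈ s0 :: rest, c ∈ t)) =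
      (PySem.Set.ofList s0).filter (fun c => decide (∀ t ∈ rest, c ∈ t)) := by
    apply List.filter_congr
    intro c hc
    have hcs0 : c ∈ s0 := (PySem.Set.mem_ofList s0 c).mp hc
    by_cases h : ∀ t ∈ rest, c ∈ t
    · simp [hcs0]
    · simp only [decide_eq_decide]
      constructor
      · intro hx t ht; exact hx t (List.mem_cons_of_mem _ ht)
      · intro hx t ht
        rcases List.mem_cons.mp ht with rfl | ht'
        · exact hcs0
        · exact hx t ht'
  rw [hfilters]
  rw [PySem.Set.ofList_eq_self_of_nodup _ ((PySem.Set.nodup_ofList s0).filter _)]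
  rfl
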